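-- pv_equiv track=rewrite | github.com/damtien444/Signal-Processing-python-based | BT nhom/Lop1810-Nhom10/code/Lop1810-Nhom10-NguyenNghiaThinh-AMDF.py | multi_peak_finding
-- ===== SOURCE A (Python) =====
-- def meanx(x):
--     s = 0
--     if(len(x)==0): return 0
--     for n in x:
--         s +=n
--     return s/len(x)
--
-- def multi_peak_finding(frame, baseline):
--     peakIndices = []
--     peakIndex = None
--     peakValue = None
--
--     for index, value in enumerate(frame):
--         if value < baseline:
--             if peakValue == None or value < peakValue:
--                 peakIndex = index
--                 peakValue = value
--         elif value > baseline and peakIndex != None: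
--             peakIndices.append(peakIndex)
--             peakIndex = None
--             peakValue = None
--
--     if peakIndex != None:
--         peakIndices.append(peakIndex)
--
--     return peakIndices
--
-- def baseline(x):
--     return meanx(x)
-- ===== SOURCE B (Python) =====
-- def multi_peak_finding(frame, baseline):
--     # Pass 1: split the frame into maximal segments separated by strictly-above-baseline samples.
--     segments = []
--     cur = []
--     for i, v in enumerate(frame):
--         if v > baseline:
--             if cur:
--                 segments.append(cur)
--                 cur = []
--         else:
--             cur.append((i, v))
--     if cur:
--         segments.append(cur)
--     # Pass 2: in each segment, take the first index attaining the minimum among sub-baseline samples.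
--     out = []
--     for seg in segments:
--         below = [(i, v) for (i, v) in seg if v < baseline]
--         if below:
--             m = min(v for (_, v) in below)
--             out.append(next(i for (i, v) in below if v == m))
--     return out
-- ===== Notes on version B (the rewrite author's own statement) =====
-- stated objective: alternative
-- what changed: Replaces A's single running-min-with-reset state machine by a two-pass decomposition: split the frame into maximal segments bounded by strictly-above-baseline samples, then emit each segment's first index of the minimum among its sub-baseline samples.
import Mathlib
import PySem

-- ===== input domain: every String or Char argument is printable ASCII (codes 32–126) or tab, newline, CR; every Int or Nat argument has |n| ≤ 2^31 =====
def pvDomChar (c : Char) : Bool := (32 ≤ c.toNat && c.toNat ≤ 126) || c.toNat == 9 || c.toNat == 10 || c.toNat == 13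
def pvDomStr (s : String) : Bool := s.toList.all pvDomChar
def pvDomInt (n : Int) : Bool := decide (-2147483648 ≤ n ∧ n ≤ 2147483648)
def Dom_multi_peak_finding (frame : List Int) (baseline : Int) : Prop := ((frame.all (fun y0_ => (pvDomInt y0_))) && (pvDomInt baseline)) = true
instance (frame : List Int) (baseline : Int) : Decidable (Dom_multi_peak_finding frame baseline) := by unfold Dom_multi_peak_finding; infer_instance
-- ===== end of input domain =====

-- B replaces A's single running-min-with-reset loop by two passes (split into segments, then per-segment
-- first-argmin of the sub-baseline samples); objective: alternative decomposition, same cost.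

-- ===== PORT A =====
-- A's loop over enumerate(frame) with state (peakIndices, peakIndex, peakValue); branches in A's order.
def mpfLoop (baseline : Int) : List (Int × Int) → List Int → Option Int → Option Int → List Int
  | [], peakIndices, peakIndex, _ =>
      match peakIndex with
      | some i => peakIndices ++ [i]
      | none => peakIndices
  | (index, value) :: rest, peakIndices, peakIndex, peakValue =>
      if value < baseline then
        if (match peakValue with | none => true | some pv => decide (value < pv)) then
          mpfLoop baseline rest peakIndices (some index) (some value)
        else
          mpfLoop baseline rest peakIndices peakIndex peakValue
      else
        -- elif value > baseline and peakIndex != None (short-circuit)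
        match peakIndex with
        | some i =>
            if value > baseline then mpfLoop baseline rest (peakIndices ++ [i]) none none
            else mpfLoop baseline rest peakIndices peakIndex peakValue
        | none => mpfLoop baseline rest peakIndices peakIndex peakValue

def multi_peak_finding (frame : List Int) (baseline : Int) : List Int :=
  mpfLoop baseline (PySem.List.enumerate frame) [] none none

-- ===== PORT B =====
-- Pass 1 of Source B: split into maximal segments separated by strictly-above-baseline samples.
def mpfSegs (baseline : Int) : List (Int × Int) → List (Int × Int) → List (List (Int × Int))
  | [], cur => if cur.isEmpty then [] else [cur]
  | (i, v) :: rest, cur =>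
      if v > baseline then
        if cur.isEmpty then mpfSegs baseline rest []
        else cur :: mpfSegs baseline rest []
      else
        mpfSegs baseline rest (cur ++ [(i, v)])

-- Pass 2 of Source B: per segment, the first index attaining the minimum among sub-baseline samples.
def mpfPick (baseline : Int) (seg : List (Int × Int)) : Option Int :=
  match seg.filter (fun p => p.2 < baseline) with
  | [] => none
  | p :: rest =>
      let m := (rest.map Prod.snd).foldl min p.2
      ((p :: rest).find? (fun q => q.2 == m)).map Prod.fst

def multi_peak_finding_alt (frame : List Int) (baseline : Int) : List Int :=
  (mpfSegs baseline (PySem.List.enumerate frame) []).filterMap (mpfPick baseline)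

-- ===== PRECONDITION & SPEC =====
def Spec_multi_peak_finding (frame : List Int) (baseline : Int) (out : List Int) : Prop := out = multi_peak_finding_alt frame baseline
instance (frame : List Int) (baseline : Int) (out : List Int) : Decidable (Spec_multi_peak_finding frame baseline out) := by unfold Spec_multi_peak_finding; infer_instance

-- ===== CLAIM (what is proved, stated in full; the proofs are below) =====
def Claim_equal_multi_peak_finding : Prop := ∀ (frame : List Int) (baseline : Int), Dom_multi_peak_finding frame baseline → Spec_multi_peak_finding frame baseline (multi_peak_finding frame baseline)

-- ===== LEMMAS AND PROOFS =====

-- A's state-update step, as a function of the optional current best (index, value).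
def mpfStep (baseline : Int) (st : Option (Int × Int)) (p : Int × Int) : Option (Int × Int) :=
  if p.2 < baseline then
    match st with
    | none => some p
    | some q => if p.2 < q.2 then some p else some q
  else st

-- running first-argmin over a nonempty list
def runMin (p : Int × Int) (l : List (Int × Int)) : Int × Int :=
  l.foldl (fun q r => if r.2 < q.2 then r else q) p

lemma foldl_min_le (v : Int) (l : List Int) : l.foldl min v ≤ v := by
  induction l generalizing v with
  | nil => simp
  | cons w t ih => exact le_trans (ih (min v w)) (min_le_left v w)

lemma find_min (p : Int × Int) (rest : List (Int × Int)) :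
    ((p :: rest).find? (fun q => q.2 == (rest.map Prod.snd).foldl min p.2)) = some (runMin p rest) := by
  induction rest generalizing p with
  | nil => simp [runMin, List.find?]
  | cons r t ih =>
    by_cases hlt : r.2 < p.2
    · have hmin : min p.2 r.2 = r.2 := min_eq_right (le_of_lt hlt)
      have hm_le : (t.map Prod.snd).foldl min r.2 ≤ r.2 := foldl_min_le _ _
      have hne : ¬ (p.2 == (t.map Prod.snd).foldl min r.2) = true := by
        simp only [beq_iff_eq]
        omega
      have : runMin p (r :: t) = runMin r t := by simp [runMin, List.foldl, hlt]
      rw [this, ← ih r]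
      simp [List.find?, List.map, hmin, hne]
    · have hmin : min p.2 r.2 = p.2 := min_eq_left (le_of_not_gt hlt)
      have hm_le : (t.map Prod.snd).foldl min p.2 ≤ p.2 := foldl_min_le _ _
      have hrun : runMin p (r :: t) = runMin p t := by simp [runMin, List.foldl, hlt]
      rw [hrun, ← ih p]
      by_cases hp : (p.2 == (t.map Prod.snd).foldl min p.2) = true
      · simp [List.find?, List.map, hmin, hp]
      · have hr : ¬ (r.2 == (t.map Prod.snd).foldl min p.2) = true := by
          simp only [beq_iff_eq] at hp ⊢
          have hpr : p.2 ≤ r.2 := le_of_not_gt hlt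
          omega
        simp [List.find?, List.map, hmin, hp, hr]

lemma foldl_step_below (baseline : Int) (p : Int × Int) (rest : List (Int × Int))
    (h : ∀ r ∈ rest, r.2 < baseline) :
    rest.foldl (mpfStep baseline) (some p) = some (runMin p rest) := by
  induction rest generalizing p with
  | nil => simp [runMin]
  | cons r t ih =>
    have hr : r.2 < baseline := h r (by simp)
    have ht : ∀ q ∈ t, q.2 < baseline := fun q hq => h q (by simp [hq])
    by_cases hlt : r.2 < p.2
    · simp [List.foldl, mpfStep, hr, hlt, ih r ht, runMin]
    · simp [List.foldl, mpfStep, hr, hlt, ih p ht, runMin]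

-- the step ignores elements that are not strictly below baseline
lemma foldl_step_eq_filter (baseline : Int) (seg : List (Int × Int)) (st : Option (Int × Int)) :
    seg.foldl (mpfStep baseline) st = (seg.filter (fun p => p.2 < baseline)).foldl (mpfStep baseline) st := by
  induction seg generalizing st with
  | nil => rfl
  | cons p t ih =>
    by_cases hp : p.2 < baseline
    · simp [List.foldl, List.filter, hp, ih]
    · simp [List.foldl, List.filter, hp, mpfStep, ih]

-- characterization of B's per-segment choice as A's running state over the segment
lemma pick_eq (baseline : Int) (seg : List (Int × Int)) :
    mpfPick baseline seg = (seg.foldl (mpfStep baseline) none).map Prod.fst := by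
  rw [foldl_step_eq_filter]
  unfold mpfPick
  cases hf : seg.filter (fun p => p.2 < baseline) with
  | nil => simp
  | cons p rest =>
    have hbelow : ∀ r ∈ p :: rest, r.2 < baseline := by
      intro r hr
      have : r ∈ seg.filter (fun p => p.2 < baseline) := hf ▸ hr
      simpa using (List.of_mem_filter this)
    have hp : p.2 < baseline := hbelow p (by simp)
    have hrest : ∀ r ∈ rest, r.2 < baseline := fun r hr => hbelow r (by simp [hr])
    simp only [List.foldl, mpfStep, hp, if_pos]
    rw [foldl_step_below baseline p rest hrest, find_min]

-- main invariant: A's loop with state = fold of the current open segment equals B's remaining work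
lemma loop_eq (baseline : Int) (pairs : List (Int × Int)) :
    ∀ (acc : List Int) (cur : List (Int × Int)),
    mpfLoop baseline pairs acc ((cur.foldl (mpfStep baseline) none).map Prod.fst)
        ((cur.foldl (mpfStep baseline) none).map Prod.snd)
      = acc ++ (mpfSegs baseline pairs cur).filterMap (mpfPick baseline) := by
  induction pairs with
  | nil =>
    intro acc cur
    by_cases hcur : cur.isEmpty
    · have : cur = [] := List.isEmpty_iff.mp hcur
      subst this
      simp [mpfLoop, mpfSegs]
    · cases hst : cur.foldl (mpfStep baseline) none with
      | none =>
        have hpick : mpfPick baseline cur = none := by rw [pick_eq, hst]; rfl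
        simp [mpfLoop, mpfSegs, hcur, hpick]
      | some q =>
        have hpick : mpfPick baseline cur = some q.1 := by rw [pick_eq, hst]; rfl
        simp [mpfLoop, mpfSegs, hcur, hpick]
  | cons pr rest ih =>
    intro acc cur
    obtain ⟨i, v⟩ := pr
    by_cases hlt : v < baseline
    · -- A updates its running min; B extends the open segment
      have hstep : (cur ++ [(i, v)]).foldl (mpfStep baseline) none
          = mpfStep baseline (cur.foldl (mpfStep baseline) none) (i, v) := by
        rw [List.foldl_append]; rfl
      have hng : ¬ v > baseline := by omega
      cases hst : cur.foldl (mpfStep baseline) none with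
      | none =>
        have := ih acc (cur ++ [(i, v)])
        rw [hstep, hst] at this
        simpa [mpfLoop, mpfSegs, hlt, hng, mpfStep, hst] using this
      | some q =>
        by_cases hq : v < q.2
        · have := ih acc (cur ++ [(i, v)])
          rw [hstep, hst] at this
          simpa [mpfLoop, mpfSegs, hlt, hng, mpfStep, hq] using this
        · have := ih acc (cur ++ [(i, v)])
          rw [hstep, hst] at this
          simpa [mpfLoop, mpfSegs, hlt, hng, mpfStep, hq] using this
    · by_cases hgt : v > baseline
      · -- A closes (and possibly emits); B ends the segment
        cases hst : cur.foldl (mpfStep baseline) none with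
        | none =>
          by_cases hcur : cur.isEmpty
          · have := ih acc ([] : List (Int × Int))
            simpa [mpfLoop, mpfSegs, hlt, hgt, hcur, hst] using this
          · have hpick : mpfPick baseline cur = none := by rw [pick_eq, hst]; rfl
            have := ih acc ([] : List (Int × Int))
            simpa [mpfLoop, mpfSegs, hlt, hgt, hcur, hst, hpick] using this
        | some q =>
          have hcur : ¬ cur.isEmpty := by
            intro h
            rw [List.isEmpty_iff.mp h] at hst
            simp at hst
          have hpick : mpfPick baseline cur = some q.1 := by rw [pick_eq, hst]; rfl
          have := ih (acc ++ [q.1]) ([] : List (Int × Int))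
          simpa [mpfLoop, mpfSegs, hlt, hgt, hcur, hst, hpick] using this
      · -- v == baseline: A ignores it; B appends it to the segment (it changes nothing)
        have hstep : (cur ++ [(i, v)]).foldl (mpfStep baseline) none
            = cur.foldl (mpfStep baseline) none := by
          rw [List.foldl_append]
          simp [List.foldl, mpfStep, hlt]
        cases hst : cur.foldl (mpfStep baseline) none with
        | none =>
          have := ih acc (cur ++ [(i, v)])
          rw [hstep, hst] at this
          simpa [mpfLoop, mpfSegs, hlt, hgt, hst] using this
        | some q =>
          have := ih acc (cur ++ [(i, v)])
          rw [hstep, hst] at this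
          simpa [mpfLoop, mpfSegs, hlt, hgt, hst] using this

-- ===== VERDICT (by name: the statement is the Claim_ definition above) =====
theorem multi_peak_finding_spec : Claim_equal_multi_peak_finding := by
  intro frame baseline _
  unfold Spec_multi_peak_finding multi_peak_finding multi_peak_finding_alt
  have := loop_eq baseline (PySem.List.enumerate frame) [] []
  simpa using this
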